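-- pv_equiv track=rewrite | github.com/syedhyderr/mapup-assesment | MapUp-DA-Assessment-2024-main/submissions/python_section_1.py | rotate_and_transform
-- ===== SOURCE A (Python) =====
-- def rotate_and_transform(matrix):
--     n = len(matrix)
--
--     rotated_matrix = [[matrix[n - j - 1][i] for j in range(n)] for i in range(n)]
--
--     final_matrix = [[0] * n for _ in range(n)]
--
--     for i in range(n):
--         for j in range(n):
--             row_sum = sum(rotated_matrix[i])
--             col_sum = sum(rotated_matrix[k][j] for k in range(n))
--             final_matrix[i][j] = row_sum + col_sum - rotated_matrix[i][j]
--
--     return final_matrix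
-- ===== SOURCE B (Python) =====
-- def rotate_and_transform(matrix):
--     n = len(matrix)
--     rotated = [[matrix[n - j - 1][i] for j in range(n)] for i in range(n)]
--     row_sums = [sum(row) for row in rotated]
--     col_sums = [sum(col) for col in zip(*rotated)]
--     return [[row_sums[i] + col_sums[j] - rotated[i][j] for j in range(n)]
--             for i in range(n)]
-- ===== Notes on version B (the rewrite author's own statement) =====
-- stated objective: faster
-- what changed: B precomputes the rotated matrix's row sums and column sums once (columns via zip(*rotated)) and combines them per cell, instead of A's re-summing a whole row and a whole column for every single cell.
import Mathlib
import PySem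

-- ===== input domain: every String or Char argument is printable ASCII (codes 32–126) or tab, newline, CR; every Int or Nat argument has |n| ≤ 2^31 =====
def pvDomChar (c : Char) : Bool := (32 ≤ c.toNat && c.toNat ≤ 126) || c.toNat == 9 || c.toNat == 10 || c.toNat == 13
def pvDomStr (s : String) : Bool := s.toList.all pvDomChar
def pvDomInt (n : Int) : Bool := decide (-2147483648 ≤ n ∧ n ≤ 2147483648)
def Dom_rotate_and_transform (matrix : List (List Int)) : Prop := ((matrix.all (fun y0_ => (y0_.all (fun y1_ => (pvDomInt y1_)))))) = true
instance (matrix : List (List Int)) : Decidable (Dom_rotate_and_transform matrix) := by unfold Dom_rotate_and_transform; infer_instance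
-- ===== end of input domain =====

-- B precomputes the row sums and column sums of the rotated matrix once (via zip(*rotated))
-- and combines them per cell, instead of A's re-summing a whole row and a whole column for
-- every single cell.

-- ===== PORT A =====
-- Port of A.  The in-place fill of final_matrix (each cell assigned exactly once, row-major)
-- is ported as the nested map producing the assigned values; pyGetD's default is never used
-- on inputs satisfying Pre_ (A raises exactly where an index is out of range).
def rotate_and_transform (matrix : List (List Int)) : List (List Int) :=
  let n := matrix.length
  let rotated := (List.range n).map (fun (i : Nat) => (List.range n).map (fun (j : Nat) =>
    PySem.List.pyGetD (PySem.List.pyGetD matrix ((n : Int) - (j : Int) - 1) []) (i : Int) 0))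
  (List.range n).map (fun (i : Nat) => (List.range n).map (fun (j : Nat) =>
    let row_sum := (PySem.List.pyGetD rotated (i : Int) []).sum
    let col_sum := ((List.range n).map (fun (k : Nat) =>
      PySem.List.pyGetD (PySem.List.pyGetD rotated (k : Int) []) (j : Int) 0)).sum
    row_sum + col_sum - PySem.List.pyGetD (PySem.List.pyGetD rotated (i : Int) []) (j : Int) 0))

-- ===== PORT B =====
-- zip(*rows): the j-th output row holds the j-th element of every row, for j below the
-- minimum row length (exact hand port of Python's zip over the unpacked rows).
def pyZipStar (rows : List (List Int)) : List (List Int) :=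
  (List.range (((rows.map List.length).min?).getD 0)).map (fun (j : Nat) =>
    rows.map (fun r => PySem.List.pyGetD r (j : Int) 0))

def rotate_and_transform_alt (matrix : List (List Int)) : List (List Int) :=
  let n := matrix.length
  let rotated := (List.range n).map (fun (i : Nat) => (List.range n).map (fun (j : Nat) =>
    PySem.List.pyGetD (PySem.List.pyGetD matrix ((n : Int) - (j : Int) - 1) []) (i : Int) 0))
  let rowSums := rotated.map List.sum
  let colSums := (pyZipStar rotated).map List.sum
  (List.range n).map (fun (i : Nat) => (List.range n).map (fun (j : Nat) =>
    PySem.List.pyGetD rowSums (i : Int) 0 + PySem.List.pyGetD colSums (j : Int) 0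
      - PySem.List.pyGetD (PySem.List.pyGetD rotated (i : Int) []) (j : Int) 0))

-- ===== PRECONDITION & SPEC =====
-- Pre_ : exactly the inputs where A returns normally (every row at least as long as the
-- number of rows; otherwise A's indexing raises IndexError, and so does B's).
def Pre_rotate_and_transform (matrix : List (List Int)) : Prop :=
  ∀ row ∈ matrix, matrix.length ≤ row.length
instance (matrix : List (List Int)) : Decidable (Pre_rotate_and_transform matrix) := by
  unfold Pre_rotate_and_transform; infer_instance
def pvWitness_rotate_and_transform : List (List Int) := [[1, 2], [3, 4]]

def Spec_rotate_and_transform (matrix : List (List Int)) (out : List (List Int)) : Prop :=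
  out = rotate_and_transform_alt matrix
instance (matrix : List (List Int)) (out : List (List Int)) :
    Decidable (Spec_rotate_and_transform matrix out) := by
  unfold Spec_rotate_and_transform; infer_instance

-- ===== CLAIM (what is proved, stated in full; the proofs are below) =====
def Claim_equal_rotate_and_transform : Prop := ∀ (matrix : List (List Int)), Dom_rotate_and_transform matrix → Pre_rotate_and_transform matrix → Spec_rotate_and_transform matrix (rotate_and_transform matrix)

-- ===== LEMMAS AND PROOFS =====

theorem min?_replicate (n : Nat) (a : Nat) (h : 0 < n) :
    (List.replicate n a).min? = some a := by
  induction n with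
  | zero => omega
  | succ k ih =>
    cases Nat.eq_zero_or_pos k with
    | inl h0 => subst h0; simp [List.replicate]
    | inr hk =>
      rw [List.replicate_succ, List.min?_cons]
      rw [ih hk]
      simp

theorem pyGetD_lt {a : Type} (xs : List a) (k : Nat) (d : a) (h : k < xs.length) :
    PySem.List.pyGetD xs (k : Int) d = xs[k] := by
  simp [PySem.List.pyGetD_natCast, List.getElem?_eq_getElem h]

-- pyZipStar of a nonempty uniform n-by-n block is the index-wise transpose
theorem pyZipStar_uniform (R : List (List Int)) (n : Nat) (hn : 0 < n) (hR : R.length = n)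
    (hrow : ∀ r ∈ R, r.length = n) :
    pyZipStar R = (List.range n).map (fun (j : Nat) =>
      R.map (fun r => PySem.List.pyGetD r (j : Int) 0)) := by
  unfold pyZipStar
  have hlen : R.map List.length = List.replicate n n := by
    apply List.ext_getElem
    · simp [hR]
    · intro k h1 h2
      have hk : k < R.length := by simpa using h1
      simp only [List.getElem_map, List.getElem_replicate]
      exact hrow _ (List.getElem_mem hk)
  rw [hlen, min?_replicate n n hn]
  rfl

-- summing a function over the rows by index equals summing over the list
theorem sum_over_range (R : List (List Int)) (g : List Int → Int) :
    ((List.range R.length).map (fun (k : Nat) => g (PySem.List.pyGetD R (k : Int) []))).sum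
      = (R.map g).sum := by
  congr 1
  apply List.ext_getElem
  · simp
  · intro k h1 h2
    have hk : k < R.length := by simpa using h1
    simp only [List.getElem_map, List.getElem_range]
    rw [pyGetD_lt R k [] hk]

-- with the shared rotated matrix as a uniform n-by-n block R, the two outputs agree:
-- A recomputes each row and column sum per cell, B looks them up in the precomputed lists
theorem final_eq (n : Nat) (R : List (List Int)) (hRlen : R.length = n)
    (hRrow : ∀ r ∈ R, r.length = n) :
    ((List.range n).map (fun (i : Nat) => (List.range n).map (fun (j : Nat) =>
        (PySem.List.pyGetD R (i : Int) []).sum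
        + ((List.range n).map (fun (k : Nat) =>
            PySem.List.pyGetD (PySem.List.pyGetD R (k : Int) []) (j : Int) 0)).sum
        - PySem.List.pyGetD (PySem.List.pyGetD R (i : Int) []) (j : Int) 0)))
    = (List.range n).map (fun (i : Nat) => (List.range n).map (fun (j : Nat) =>
        PySem.List.pyGetD (R.map List.sum) (i : Int) 0
        + PySem.List.pyGetD ((pyZipStar R).map List.sum) (j : Int) 0
        - PySem.List.pyGetD (PySem.List.pyGetD R (i : Int) []) (j : Int) 0)) := by
  rcases Nat.eq_zero_or_pos n with h0 | hn0
  · subst h0; rfl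
  rw [pyZipStar_uniform R n hn0 hRlen hRrow]
  apply List.ext_getElem
  · simp
  · intro i h1 h2
    have hin : i < n := by simpa using h1
    have hiR : i < R.length := by omega
    simp only [List.getElem_map, List.getElem_range]
    apply List.ext_getElem
    · simp
    · intro j h3 h4
      have hjn : j < n := by simpa using h3
      simp only [List.getElem_map, List.getElem_range]
      rw [pyGetD_lt (R.map List.sum) i 0 (by simpa using hiR),
          pyGetD_lt (((List.range n).map fun (j : Nat) =>
            R.map fun r => PySem.List.pyGetD r (j : Int) 0).map List.sum) j 0 (by simpa using hjn),
          pyGetD_lt R i [] hiR]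
      simp only [List.getElem_map, List.getElem_range]
      have hsum : ((List.range n).map (fun (k : Nat) =>
          PySem.List.pyGetD (PySem.List.pyGetD R (k : Int) []) (j : Int) 0)).sum
          = (R.map (fun r => PySem.List.pyGetD r (j : Int) 0)).sum := by
        rw [← hRlen]
        exact sum_over_range R (fun r => PySem.List.pyGetD r (j : Int) 0)
      rw [hsum]

-- ===== VERDICT (by name: the statement is the Claim_ definition above) =====
theorem rotate_and_transform_spec : Claim_equal_rotate_and_transform := by
  intro matrix _ hpre
  unfold Spec_rotate_and_transform
  simp only [rotate_and_transform, rotate_and_transform_alt]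
  exact final_eq matrix.length _ (by simp)
    (by intro r hr; obtain ⟨i, -, rfl⟩ := List.mem_map.mp hr; simp)
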